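-- pv_equiv track=rewrite | github.com/freemancho1/modbus | slave/slave_utils.py | get_long_from_word_list
-- ===== SOURCE A (Python) =====
-- def get_long_from_word_list(word_list, big_endian=True, double_words=False):
--     long_list = []
--     block_size = 4 if double_words else 2
--
--     for idx in range(int(len(word_list) / block_size)):
--         start = block_size * idx
--         long_data = 0
--         if big_endian:
--             if double_words:
--                 long_data += (word_list[start] << 48) + (word_list[start+1] << 32) + \
--                              (word_list[start+2] << 16) + word_list[start+3]
--             else:
--                 long_data += (word_list[start] << 16) + word_list[start+1]
--         else:
--             if double_words:
--                 long_data += (word_list[start+3] << 48) + (word_list[start+2] << 32)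
--             long_data += (word_list[start+1] << 16) + word_list[start]
--         long_list.append(long_data)
--
--     return long_list
-- ===== SOURCE B (Python) =====
-- def get_long_from_word_list(word_list, big_endian=True, double_words=False):
--     # Streaming one-pass combine: a Horner-style accumulator absorbs each word as it
--     # arrives (big-endian: acc = (acc << 16) + w; little-endian: acc += w << 16*count)
--     # and a full block is emitted immediately; a trailing partial block is discarded,
--     # matching A's int(len/block_size) block count. No index arithmetic, no per-case
--     # block formulas.
--     block_size = 4 if double_words else 2
--     long_list = []
--     acc = 0
--     count = 0
--     for w in word_list:
--         acc = (acc << 16) + w if big_endian else acc + (w << (16 * count))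
--         count += 1
--         if count == block_size:
--             long_list.append(acc)
--             acc = 0
--             count = 0
--     return long_list
-- ===== Notes on version B (the rewrite author's own statement) =====
-- stated objective: alternative
-- what changed: Replaced A's indexed block loop with four hardcoded endianness/width formulas by a single streaming pass over the words with a Horner-style accumulator that absorbs each word and emits a long whenever a block fills.
import Mathlib
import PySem

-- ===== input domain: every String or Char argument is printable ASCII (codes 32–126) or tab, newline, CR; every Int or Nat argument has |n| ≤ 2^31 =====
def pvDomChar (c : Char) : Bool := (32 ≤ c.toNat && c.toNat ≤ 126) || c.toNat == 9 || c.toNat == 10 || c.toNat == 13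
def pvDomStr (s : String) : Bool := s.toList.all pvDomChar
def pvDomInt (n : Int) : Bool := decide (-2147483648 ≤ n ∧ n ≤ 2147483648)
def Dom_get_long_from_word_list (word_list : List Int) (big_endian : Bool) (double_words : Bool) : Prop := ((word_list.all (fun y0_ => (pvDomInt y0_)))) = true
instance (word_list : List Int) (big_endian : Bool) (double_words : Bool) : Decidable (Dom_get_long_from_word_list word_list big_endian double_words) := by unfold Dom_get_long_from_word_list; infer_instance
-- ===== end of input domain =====

-- B replaces A's indexed per-block branch formulas by a single streaming pass with a
-- Horner-style accumulator (objective: alternative decomposition); same O(n) cost,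
-- return value identical.

-- Python's 'n << k' on ints for a nonnegative shift k (exact: n << k = n * 2^k).
def pyShl (n : Int) (k : Int) : Int := n * 2 ^ k.toNat

-- ===== PORT A =====
def get_long_from_word_list (word_list : List Int) (big_endian : Bool) (double_words : Bool) : List Int :=
  let block_size : Int := if double_words then 4 else 2
  -- int(len(word_list) / block_size): float truncation = floor division for these nonnegative operands
  let n : Int := PySem.Int.floordiv (Int.ofNat word_list.length) block_size
  (PySem.List.pyRange 0 n 1).foldl (fun long_list idx =>
    let start := block_size * idx
    -- word_list[i]: every index reached is in range (idx < len/block_size), so the default is never used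
    let g := fun i => PySem.List.pyGetD word_list i 0
    let long_data : Int := 0
    let long_data :=
      if big_endian then
        if double_words then
          long_data + (pyShl (g start) 48 + pyShl (g (start+1)) 32 +
                       pyShl (g (start+2)) 16 + g (start+3))
        else
          long_data + (pyShl (g start) 16 + g (start+1))
      else
        let ld := if double_words then
            long_data + (pyShl (g (start+3)) 48 + pyShl (g (start+2)) 32)
          else long_data
        ld + (pyShl (g (start+1)) 16 + g start)
    long_list ++ [long_data]) []

-- ===== PORT B =====
-- one loop step of Source B: absorb a word into the accumulator; emit on a full block
def glwStep (block_size : Int) (big_endian : Bool)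
    (st : List Int × Int × Int) (w : Int) : List Int × Int × Int :=
  let acc := if big_endian then pyShl st.2.1 16 + w else st.2.1 + pyShl w (16 * st.2.2)
  let count := st.2.2 + 1
  if count = block_size then (st.1 ++ [acc], 0, 0) else (st.1, acc, count)

def get_long_from_word_list_alt (word_list : List Int) (big_endian : Bool) (double_words : Bool) : List Int :=
  let block_size : Int := if double_words then 4 else 2
  (word_list.foldl (glwStep block_size big_endian) ([], 0, 0)).1

-- ===== PRECONDITION & SPEC =====
def Spec_get_long_from_word_list (word_list : List Int) (big_endian : Bool) (double_words : Bool) (out : List Int) : Prop := out = get_long_from_word_list_alt word_list big_endian double_words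
instance (word_list : List Int) (big_endian : Bool) (double_words : Bool) (out : List Int) : Decidable (Spec_get_long_from_word_list word_list big_endian double_words out) := by unfold Spec_get_long_from_word_list; infer_instance

-- ===== CLAIM (what is proved, stated in full; the proofs are below) =====
def Claim_equal_get_long_from_word_list : Prop := ∀ (word_list : List Int) (big_endian : Bool) (double_words : Bool), Dom_get_long_from_word_list word_list big_endian double_words → Spec_get_long_from_word_list word_list big_endian double_words (get_long_from_word_list word_list big_endian double_words)

-- ===== LEMMAS AND PROOFS =====

-- common reference form: pack the list in blocks of 2 (resp. 4) by a combiner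
def pack2 (f : Int → Int → Int) : List Int → List Int
  | a :: b :: rest => f a b :: pack2 f rest
  | _ => []

def pack4 (f : Int → Int → Int → Int → Int) : List Int → List Int
  | a :: b :: c :: d :: rest => f a b c d :: pack4 f rest
  | _ => []

-- A side, block size 2: the indexed map equals pack2
theorem mapA2 (f : Int → Int → Int) (l : List Int) :
    (List.range (l.length / 2)).map
      (fun k => f (PySem.List.pyGetD l ((2 * k : Nat) : Int) 0)
                  (PySem.List.pyGetD l ((2 * k + 1 : Nat) : Int) 0)) = pack2 f l := by
  induction l using pack2.induct with
  | case1 a b rest ih =>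
    have hlen : (a :: b :: rest).length / 2 = rest.length / 2 + 1 := by
      simp [List.length_cons]; omega
    rw [hlen, List.range_succ_eq_map]
    simp only [List.map_cons, List.map_map, pack2]
    congr 1
    · simp [PySem.List.pyGetD_ofNat']
    · rw [← ih]
      refine List.map_congr_left (fun k _ => ?_)
      simp only [Function.comp, Nat.succ_eq_add_one, PySem.List.pyGetD_natCast,
        show ∀ k : Nat, 2 * (k + 1) = 2 * k + 1 + 1 from fun k => by omega,
        List.getD_cons_succ]
  | case2 t h =>
    match t, h with
    | [], _ => simp [pack2]
    | [a], _ => simp [pack2]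
    | a :: b :: rest, h => exact (h a b rest rfl).elim

-- A side, block size 4
theorem mapA4 (f : Int → Int → Int → Int → Int) (l : List Int) :
    (List.range (l.length / 4)).map
      (fun k => f (PySem.List.pyGetD l ((4 * k : Nat) : Int) 0)
                  (PySem.List.pyGetD l ((4 * k + 1 : Nat) : Int) 0)
                  (PySem.List.pyGetD l ((4 * k + 2 : Nat) : Int) 0)
                  (PySem.List.pyGetD l ((4 * k + 3 : Nat) : Int) 0)) = pack4 f l := by
  induction l using pack4.induct with
  | case1 a b c d rest ih =>
    have hlen : (a :: b :: c :: d :: rest).length / 4 = rest.length / 4 + 1 := by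
      simp [List.length_cons]; omega
    rw [hlen, List.range_succ_eq_map]
    simp only [List.map_cons, List.map_map, pack4]
    congr 1
    · simp [PySem.List.pyGetD_ofNat']
    · rw [← ih]
      refine List.map_congr_left (fun k _ => ?_)
      simp only [Function.comp, Nat.succ_eq_add_one, PySem.List.pyGetD_natCast,
        show ∀ k : Nat, 4 * (k + 1) = 4 * k + 1 + 1 + 1 + 1 from fun k => by omega,
        List.getD_cons_succ]
  | case2 t h =>
    match t, h with
    | [], _ => simp [pack4]
    | [a], _ => simp [pack4]
    | [a, b], _ => simp [pack4]
    | [a, b, c], _ => simp [pack4]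
    | a :: b :: c :: d :: rest, h => exact (h a b c d rest rfl).elim

-- B side, block size 2: the streaming fold equals pack2 of the endianness combiner
theorem foldB2 (be : Bool) (l : List Int) (out : List Int) :
    (l.foldl (glwStep 2 be) (out, 0, 0)).1 =
      out ++ pack2 (fun a b => if be then pyShl a 16 + b else a + pyShl b 16) l := by
  induction l using pack2.induct generalizing out with
  | case1 a b rest ih =>
    rw [show (a :: b :: rest) = [a, b] ++ rest by rfl, List.foldl_append]
    have hstep : ([a, b].foldl (glwStep 2 be) (out, 0, 0)) =
        (out ++ [if be then pyShl a 16 + b else a + pyShl b 16], 0, 0) := by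
      cases be <;> simp [glwStep, pyShl]
    rw [hstep, ih]
    simp [pack2]
  | case2 x h =>
    match x, h with
    | [], _ => simp [pack2]
    | [a], _ => cases be <;> simp [glwStep, pack2]
    | a :: b :: rest, h => exact (h a b rest rfl).elim

-- B side, block size 4
theorem foldB4 (be : Bool) (l : List Int) (out : List Int) :
    (l.foldl (glwStep 4 be) (out, 0, 0)).1 =
      out ++ pack4 (fun a b c d =>
        if be then pyShl a 48 + pyShl b 32 + pyShl c 16 + d
        else pyShl d 48 + pyShl c 32 + pyShl b 16 + a) l := by
  induction l using pack4.induct generalizing out with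
  | case1 a b c d rest ih =>
    rw [show (a :: b :: c :: d :: rest) = [a, b, c, d] ++ rest by rfl, List.foldl_append]
    have hstep : ([a, b, c, d].foldl (glwStep 4 be) (out, 0, 0)) =
        (out ++ [if be then pyShl a 48 + pyShl b 32 + pyShl c 16 + d
                 else pyShl d 48 + pyShl c 32 + pyShl b 16 + a], 0, 0) := by
      cases be <;> simp [glwStep, pyShl] <;> ring_nf
    rw [hstep, ih]
    simp [pack4]
  | case2 x h =>
    match x, h with
    | [], _ => simp [pack4]
    | [a], _ => cases be <;> simp [glwStep, pack4]
    | [a, b], _ => cases be <;> simp [glwStep, pack4]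
    | [a, b, c], _ => cases be <;> simp [glwStep, pack4]
    | a :: b :: c :: d :: rest, h => exact (h a b c d rest rfl).elim

-- A as a map over the block indices
theorem glw_pointwise (wl : List Int) (be dw : Bool) :
    get_long_from_word_list wl be dw = get_long_from_word_list_alt wl be dw := by
  cases dw
  · -- block size 2
    have hdiv : PySem.Int.floordiv (Int.ofNat wl.length) 2 = ((wl.length / 2 : Nat) : Int) :=
      PySem.Int.floordiv_natCast wl.length 2
    unfold get_long_from_word_list get_long_from_word_list_alt
    simp only [Bool.false_eq_true, reduceIte]
    rw [hdiv, PySem.List.pyRange_zero_natCast,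
        PySem.List.foldl_append_singleton_eq_map, List.map_map]
    rw [foldB2 be wl [], ← mapA2 (fun a b => if be then pyShl a 16 + b else a + pyShl b 16) wl]
    refine List.map_congr_left (fun k _ => ?_)
    cases be <;> · simp only [Function.comp]
                   norm_num
                   try ring
  · -- block size 4
    have hdiv : PySem.Int.floordiv (Int.ofNat wl.length) 4 = ((wl.length / 4 : Nat) : Int) :=
      PySem.Int.floordiv_natCast wl.length 4
    unfold get_long_from_word_list get_long_from_word_list_alt
    simp only [reduceIte]
    rw [hdiv, PySem.List.pyRange_zero_natCast,
        PySem.List.foldl_append_singleton_eq_map, List.map_map]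
    rw [foldB4 be wl [], ← mapA4 (fun a b c d =>
        if be then pyShl a 48 + pyShl b 32 + pyShl c 16 + d
        else pyShl d 48 + pyShl c 32 + pyShl b 16 + a) wl]
    refine List.map_congr_left (fun k _ => ?_)
    cases be <;> · simp only [Function.comp]
                   norm_num
                   try ring

-- ===== VERDICT (by name: the statement is the Claim_ definition above) =====
theorem get_long_from_word_list_spec : Claim_equal_get_long_from_word_list := by
  intro wl be dw _
  unfold Spec_get_long_from_word_list
  exact glw_pointwise wl be dw
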